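-- pv_equiv track=rewrite | github.com/jeussantiago/leetcode | python/0321-create-maximum-number.py | greaterLexicographicalList
-- ===== SOURCE A (Python) =====
-- from typing import List
--
-- def greaterLexicographicalList(nums1: List[int], nums2: List[int], ind1: int, ind2: int) -> bool:
--     while ind1 < len(nums1) and ind2 < len(nums2):
--         if nums1[ind1] < nums2[ind2]:
--             return False
--         elif nums1[ind1] > nums2[ind2]:
--             return True
--         else:
--             ind1 += 1
--             ind2 += 1
--
--     # nums2 is the longer arr
--     if ind1 >= len(nums1):
--         return False
--     # nums1 is the longer arr
--     elif ind2 >= len(nums2):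
--         return True
--     # both are the same length and have the same elements, it doesn't matter what you choose as the biggest
--     return True
-- ===== SOURCE B (Python) =====
-- from typing import List
--
-- def greaterLexicographicalList(nums1: List[int], nums2: List[int], ind1: int, ind2: int) -> bool:
--     # Strict lexicographic comparison of the two suffixes, delegated to the
--     # built-in list ordering instead of walking indices by hand.
--     return nums1[ind1:] > nums2[ind2:]
-- ===== Notes on version B (the rewrite author's own statement) =====
-- stated objective: simpler
-- what changed: Replaces the manual index-advancing while-loop and its three exit branches with a single strict lexicographic comparison of the two suffix slices via the built-in list > operator.
-- outside the precondition, e.g. on greaterLexicographicalList([2, 1], [1, 2], -1, 0): A returns True, B returns False; on greaterLexicographicalList([1], [1], -5, 0): A raises IndexError, B returns False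
import Mathlib
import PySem

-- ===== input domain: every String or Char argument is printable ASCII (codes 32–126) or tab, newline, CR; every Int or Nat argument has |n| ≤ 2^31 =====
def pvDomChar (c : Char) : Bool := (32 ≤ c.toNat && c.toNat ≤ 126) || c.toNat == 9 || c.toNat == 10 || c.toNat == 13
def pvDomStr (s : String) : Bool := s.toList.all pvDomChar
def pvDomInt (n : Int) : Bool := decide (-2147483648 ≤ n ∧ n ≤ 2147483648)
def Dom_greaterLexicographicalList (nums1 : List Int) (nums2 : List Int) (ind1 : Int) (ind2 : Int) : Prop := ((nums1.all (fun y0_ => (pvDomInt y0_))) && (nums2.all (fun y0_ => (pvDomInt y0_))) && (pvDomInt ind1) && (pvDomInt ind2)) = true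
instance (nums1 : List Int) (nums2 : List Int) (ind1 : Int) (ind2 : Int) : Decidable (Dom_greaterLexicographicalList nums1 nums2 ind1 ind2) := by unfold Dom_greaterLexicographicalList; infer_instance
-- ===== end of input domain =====

-- B replaces A's index-walking loop by a strict lexicographic comparison of the two suffix slices (objective: simpler).


-- ===== PORT A =====
-- A's while-loop: advance both indices while each is below its list's length,
-- deciding as soon as the two current elements differ; then the three exit branches.
-- nums1[ind1] / nums2[ind2] are Python indexing (negative index wraps) → PySem.List.pyGet?;
-- `none` is Python's IndexError (excluded by Pre_): the port returns false there.
def greaterLexicographicalList (nums1 : List Int) (nums2 : List Int) (ind1 : Int) (ind2 : Int) : Bool :=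
  if _h : ind1 < (nums1.length : Int) ∧ ind2 < (nums2.length : Int) then
    match PySem.List.pyGet? nums1 ind1, PySem.List.pyGet? nums2 ind2 with
    | some a, some b =>
      if a < b then false
      else if a > b then true
      else greaterLexicographicalList nums1 nums2 (ind1 + 1) (ind2 + 1)
    | _, _ => false  -- IndexError in Python (ind < -len); outside Pre_
  else
    if ind1 ≥ (nums1.length : Int) then false
    else if ind2 ≥ (nums2.length : Int) then true
    else true
termination_by ((nums1.length : Int) - ind1).toNat
decreasing_by omega

-- ===== PORT B =====
-- Python's built-in strict lexicographic `>` on lists, hand-ported: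
def listGt : List Int → List Int → Bool
  | [], _ => false
  | _ :: _, [] => true
  | a :: as, b :: bs => if a > b then true else if a < b then false else listGt as bs

def greaterLexicographicalList_alt (nums1 : List Int) (nums2 : List Int) (ind1 : Int) (ind2 : Int) : Bool :=
  listGt (PySem.List.slice nums1 (some ind1) none) (PySem.List.slice nums2 (some ind2) none)

-- ===== PRECONDITION & SPEC =====
-- Pre_ restricts to nonnegative indices, the function's natural domain (the indices are
-- forward cursors): on negative indices A either raises IndexError (ind < -len while the
-- other index is below its length) or returns a value produced by Python's negative-index
-- wraparound, re-reading the list from its end past index 0, which no caller intends.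
def Pre_greaterLexicographicalList (nums1 : List Int) (nums2 : List Int) (ind1 : Int) (ind2 : Int) : Prop :=
  0 ≤ ind1 ∧ 0 ≤ ind2
instance (nums1 : List Int) (nums2 : List Int) (ind1 : Int) (ind2 : Int) : Decidable (Pre_greaterLexicographicalList nums1 nums2 ind1 ind2) := by unfold Pre_greaterLexicographicalList; infer_instance
def pvWitness_greaterLexicographicalList : List Int × List Int × Int × Int := ([3, 1, 4], [3, 1], 0, 0)

def Spec_greaterLexicographicalList (nums1 : List Int) (nums2 : List Int) (ind1 : Int) (ind2 : Int) (out : Bool) : Prop := out = greaterLexicographicalList_alt nums1 nums2 ind1 ind2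
instance (nums1 : List Int) (nums2 : List Int) (ind1 : Int) (ind2 : Int) (out : Bool) : Decidable (Spec_greaterLexicographicalList nums1 nums2 ind1 ind2 out) := by unfold Spec_greaterLexicographicalList; infer_instance

-- ===== CLAIM (what is proved, stated in full; the proofs are below) =====
def Claim_equal_greaterLexicographicalList : Prop := ∀ (nums1 : List Int) (nums2 : List Int) (ind1 : Int) (ind2 : Int), Dom_greaterLexicographicalList nums1 nums2 ind1 ind2 → Pre_greaterLexicographicalList nums1 nums2 ind1 ind2 → Spec_greaterLexicographicalList nums1 nums2 ind1 ind2 (greaterLexicographicalList nums1 nums2 ind1 ind2)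

-- ===== LEMMAS AND PROOFS =====

-- A's loop on nonnegative (natural) indices computes the strict lexicographic comparison of the drops.
theorem gl_eq_listGt_drop (nums1 nums2 : List Int) (n1 n2 : Nat) :
    greaterLexicographicalList nums1 nums2 (n1 : Int) (n2 : Int)
      = listGt (nums1.drop n1) (nums2.drop n2) := by
  rw [greaterLexicographicalList]
  by_cases h : (n1 : Int) < (nums1.length : Int) ∧ (n2 : Int) < (nums2.length : Int)
  · obtain ⟨ha, hb⟩ := h
    have ha' : n1 < nums1.length := by omega
    have hb' : n2 < nums2.length := by omega
    have e1 : PySem.List.pyGet? nums1 (n1 : Int) = some nums1[n1] := by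
      simp [List.getElem?_eq_getElem ha']
    have e2 : PySem.List.pyGet? nums2 (n2 : Int) = some nums2[n2] := by
      simp [List.getElem?_eq_getElem hb']
    have d1 : nums1.drop n1 = nums1[n1] :: nums1.drop (n1 + 1) :=
      List.drop_eq_getElem_cons ha'
    have d2 : nums2.drop n2 = nums2[n2] :: nums2.drop (n2 + 1) :=
      List.drop_eq_getElem_cons hb'
    have c1 : (n1 : Int) + 1 = ((n1 + 1 : Nat) : Int) := by push_cast; ring
    have c2 : (n2 : Int) + 1 = ((n2 + 1 : Nat) : Int) := by push_cast; ring
    rw [dif_pos ⟨ha, hb⟩, e1, e2, d1, d2]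
    simp only [listGt]
    rw [c1, c2, gl_eq_listGt_drop nums1 nums2 (n1 + 1) (n2 + 1)]
    by_cases hlt : nums1[n1] < nums2[n2]
    · rw [if_pos hlt, if_neg (by omega : ¬ nums1[n1] > nums2[n2]), if_pos hlt]
    · by_cases hgt : nums1[n1] > nums2[n2]
      · rw [if_neg hlt, if_pos hgt, if_pos hgt]
      · rw [if_neg hlt, if_neg hgt, if_neg hgt, if_neg hlt]
  · rw [dif_neg h]
    rcases not_and_or.mp h with hge | hge
    · have hge1 : nums1.length ≤ n1 := by omega
      have hd : nums1.drop n1 = [] := List.drop_eq_nil_of_le hge1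
      rw [if_pos (by omega : (n1 : Int) ≥ (nums1.length : Int)), hd]
      simp only [listGt]
    · have hge2 : nums2.length ≤ n2 := by omega
      have hd2 : nums2.drop n2 = [] := List.drop_eq_nil_of_le hge2
      by_cases hge1 : nums1.length ≤ n1
      · have hd1 : nums1.drop n1 = [] := List.drop_eq_nil_of_le hge1
        rw [if_pos (by omega : (n1 : Int) ≥ (nums1.length : Int)), hd1]
        simp only [listGt]
      · have hlt1 : n1 < nums1.length := by omega
        have hd1 : nums1.drop n1 = nums1[n1] :: nums1.drop (n1 + 1) :=
          List.drop_eq_getElem_cons hlt1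
        rw [if_neg (by omega : ¬ (n1 : Int) ≥ (nums1.length : Int)),
          if_pos (by omega : (n2 : Int) ≥ (nums2.length : Int)), hd1, hd2]
        simp only [listGt]
termination_by nums1.length - n1
decreasing_by omega

-- B's slice with a natural start index is the drop.
theorem alt_eq_listGt_drop (nums1 nums2 : List Int) (n1 n2 : Nat) :
    greaterLexicographicalList_alt nums1 nums2 (n1 : Int) (n2 : Int)
      = listGt (nums1.drop n1) (nums2.drop n2) := by
  unfold greaterLexicographicalList_alt
  rw [PySem.List.slice_from_natCast, PySem.List.slice_from_natCast]

-- ===== VERDICT (by name: the statement is the Claim_ definition above) =====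
theorem greaterLexicographicalList_spec : Claim_equal_greaterLexicographicalList := by
  intro nums1 nums2 ind1 ind2 _hdom hpre
  obtain ⟨h1, h2⟩ := hpre
  obtain ⟨n1, rfl⟩ : ∃ n : Nat, ind1 = (n : Int) := ⟨ind1.toNat, by omega⟩
  obtain ⟨n2, rfl⟩ : ∃ n : Nat, ind2 = (n : Int) := ⟨ind2.toNat, by omega⟩
  unfold Spec_greaterLexicographicalList
  rw [gl_eq_listGt_drop, alt_eq_listGt_drop]
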